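-- pv_equiv track=rewrite | github.com/bihealth/vcfpy | paper/legacy.py | region_to_bins
-- ===== SOURCE A (Python) =====
-- from typing import Dict, Generator, Iterable, List, Tuple, Union
-- from typing import Dict, Generator, Mapping, Optional, Tuple
-- from typing import Generator, Optional, Tuple
--
-- def region_to_bins(begin: int, end: int, n_levels: int = 5, min_shift: int = 14) -> Generator[int, None, None]:
--     """
--     generator of keys to bins of records which *may* overlap the given region
--
--     n_levels: int, optional
--         cluster level, 5 for tabix
--     min_shift: int, optional
--         minimum shift, 14 for tabix
--     """
--     t = 0
--     s = min_shift + (n_levels << 1) + n_levels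
--     for level in range(n_levels + 1):
--         b = t + (begin >> s)
--         e = t + (end >> s)
--         n = e - b + 1
--         for k in range(b, e + 1):
--             yield k
--             n += 1
--         t += 1 << ((level << 1) + level)
--         s -= 3
-- ===== SOURCE B (Python) =====
-- def region_to_bins(begin: int, end: int, n_levels: int = 5, min_shift: int = 14):
--     """Descent of the 8-ary bin tree: the first/last overlapping bin of each level
--     is the appropriate child (8*g + 1 + local offset) of the previous level's
--     first/last bin, so no geometric level offset is ever computed."""
--     if n_levels < 0:
--         return
--     s = min_shift + 3 * n_levels
--     lo, hi = begin >> s, end >> s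
--     yield from range(lo, hi + 1)
--     for _ in range(n_levels):
--         s -= 3
--         lo = 8 * lo + 1 + ((begin >> s) % 8)
--         hi = 8 * hi + 1 + ((end >> s) % 8)
--         yield from range(lo, hi + 1)
-- ===== Notes on version B (the rewrite author's own statement) =====
-- stated objective: alternative
-- what changed: Instead of recomputing each level's bins from a running geometric offset t and the coordinates (b = t + (begin >> s)), B descends the 8-ary bin tree: it maintains the first/last overlapping bin directly and steps each to its child via 8*g + 1 + ((coord >> s) % 8), so the offset accumulator and per-level recomputation disappear.
import Mathlib
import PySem

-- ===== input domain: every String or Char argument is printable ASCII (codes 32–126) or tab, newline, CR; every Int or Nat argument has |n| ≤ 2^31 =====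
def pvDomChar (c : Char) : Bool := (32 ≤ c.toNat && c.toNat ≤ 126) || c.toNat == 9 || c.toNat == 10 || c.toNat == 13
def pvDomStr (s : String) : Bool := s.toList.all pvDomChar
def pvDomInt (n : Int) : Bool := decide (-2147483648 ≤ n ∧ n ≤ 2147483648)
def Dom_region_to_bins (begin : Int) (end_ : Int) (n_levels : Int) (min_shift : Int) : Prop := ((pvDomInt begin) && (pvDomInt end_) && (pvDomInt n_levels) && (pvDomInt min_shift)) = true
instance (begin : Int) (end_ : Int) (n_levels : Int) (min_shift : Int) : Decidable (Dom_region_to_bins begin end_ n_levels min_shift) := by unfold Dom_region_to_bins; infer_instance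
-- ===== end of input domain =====

-- B replaces A's level loop over a running geometric offset t and shift s by a recursive
-- descent of the 8-ary bin tree (each level's endpoints are children 8*g+1+offset of the
-- previous level's endpoints); equal output proved on Pre_ (where the Python A raises on neither).

-- ===== PORT A =====
-- one iteration of A's loop: state (t, s, acc); Python '>>'/'<<' are Lean '>>>'/'<<<' on a Nat
-- shift count (exact for nonnegative shift counts; Pre_ below excludes the negative-shift raise).
def rtbStepA (begin end_ : Int) (st : Int × Int × List Int) (level : Int) : Int × Int × List Int :=
  let t := st.1
  let s := st.2.1
  let acc := st.2.2
  let b := t + (begin >>> s.toNat)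
  let e := t + (end_ >>> s.toNat)
  -- 'n = e - b + 1' and 'n += 1' are dead code in A (n is never read); they produce no output
  (t + ((1 : Int) <<< ((level <<< (1 : Nat)) + level).toNat), s - 3, acc ++ PySem.List.pyRange b (e + 1) 1)

def region_to_bins (begin : Int) (end_ : Int) (n_levels : Int) (min_shift : Int) : List Int :=
  ((PySem.List.pyRange 0 (n_levels + 1) 1).foldl (rtbStepA begin end_)
    (0, min_shift + (n_levels <<< (1 : Nat)) + n_levels, [])).2.2

-- ===== PORT B =====
-- Source B's descent loop as its structural recursion on the remaining-level count: emit this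
-- level's bins, step to the child endpoints (child of global bin g is 8*g+1+local offset),
-- recurse; 'fuel' is the number of loop iterations left (n_levels - level).
def rtbWalk (begin end_ : Int) : Nat → Int → Int → Int → List Int
  | 0, _, lo, hi => PySem.List.pyRange lo (hi + 1) 1
  | Nat.succ f, s, lo, hi =>
    PySem.List.pyRange lo (hi + 1) 1 ++
      rtbWalk begin end_ f (s - 3)
        (8 * lo + 1 + PySem.Int.mod (begin >>> (s - 3).toNat) 8)
        (8 * hi + 1 + PySem.Int.mod (end_ >>> (s - 3).toNat) 8)

def region_to_bins_alt (begin : Int) (end_ : Int) (n_levels : Int) (min_shift : Int) : List Int :=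
  if 0 ≤ n_levels then
    let s := min_shift + 3 * n_levels
    rtbWalk begin end_ n_levels.toNat s (begin >>> s.toNat) (end_ >>> s.toNat)
  else []

-- ===== PRECONDITION & SPEC =====
-- Pre_ excludes exactly the inputs where the Python A raises ValueError ('negative shift count'):
-- some executed level shifts by a negative count iff n_levels ≥ 0 and min_shift < 0 (B raises there too).
def Pre_region_to_bins (begin : Int) (end_ : Int) (n_levels : Int) (min_shift : Int) : Prop :=
  n_levels < 0 ∨ 0 ≤ min_shift
instance (begin : Int) (end_ : Int) (n_levels : Int) (min_shift : Int) : Decidable (Pre_region_to_bins begin end_ n_levels min_shift) := by unfold Pre_region_to_bins; infer_instance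

def pvWitness_region_to_bins : Int × Int × Int × Int := (100000, 200000, 5, 14)

def Spec_region_to_bins (begin : Int) (end_ : Int) (n_levels : Int) (min_shift : Int) (out : List Int) : Prop := out = region_to_bins_alt begin end_ n_levels min_shift
instance (begin : Int) (end_ : Int) (n_levels : Int) (min_shift : Int) (out : List Int) : Decidable (Spec_region_to_bins begin end_ n_levels min_shift out) := by unfold Spec_region_to_bins; infer_instance

-- ===== CLAIM (what is proved, stated in full; the proofs are below) =====
def Claim_equal_region_to_bins : Prop := ∀ (begin : Int) (end_ : Int) (n_levels : Int) (min_shift : Int), Dom_region_to_bins begin end_ n_levels min_shift → Pre_region_to_bins begin end_ n_levels min_shift → Spec_region_to_bins begin end_ n_levels min_shift (region_to_bins begin end_ n_levels min_shift)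

-- ===== LEMMAS AND PROOFS =====

-- proof-only intermediate: the bins of one level, offset and shift in closed form
def rtbLevel (begin end_ n_levels min_shift level : Int) : List Int :=
  let s := min_shift + 3 * (n_levels - level)
  let t := ((8 : Int) ^ level.toNat - 1) / 7
  PySem.List.pyRange (t + (begin >>> s.toNat)) (t + (end_ >>> s.toNat) + 1) 1

lemma t_closed_succ (k : Nat) :
    ((8 : Int) ^ (k + 1) - 1) / 7 = ((8 : Int) ^ k - 1) / 7 + 8 ^ k := by
  have h : (8 : Int) ^ (k + 1) - 1 = ((8 : Int) ^ k - 1) + 8 ^ k * 7 := by ring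
  rw [h, Int.add_mul_ediv_right _ _ (by norm_num)]

lemma seven_dvd (k : Nat) : (7 : Int) ∣ 8 ^ k - 1 := by
  induction k with
  | zero => simp
  | succ k ih =>
    have h : (8 : Int) ^ (k + 1) - 1 = 8 * ((8 : Int) ^ k - 1) + 7 := by ring
    rw [h]; exact dvd_add (ih.mul_left 8) dvd_rfl

-- the child of the level-k offset is the level-(k+1) offset
lemma t_child (k : Nat) :
    8 * (((8 : Int) ^ k - 1) / 7) + 1 = ((8 : Int) ^ (k + 1) - 1) / 7 := by
  obtain ⟨c, hc⟩ := seven_dvd k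
  have h1 : ((8 : Int) ^ k - 1) / 7 = c := by
    rw [hc]; exact Int.mul_ediv_cancel_left c (by norm_num)
  have h2 : (8 : Int) ^ (k + 1) - 1 = 7 * (8 * c + 1) := by
    have h : (8 : Int) ^ (k + 1) - 1 = 8 * ((8 : Int) ^ k - 1) + 7 := by ring
    rw [h, hc]; ring
  rw [h1, h2, Int.mul_ediv_cancel_left _ (by norm_num)]

-- splitting a right shift: shifting 3 further is floor-division by 8, the % 8 the remainder
lemma shift_split (x : Int) (m : Nat) :
    8 * (x >>> (m + 3)) + PySem.Int.mod (x >>> m) 8 = x >>> m := by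
  rw [PySem.Int.mod_eq_emod_of_pos (by norm_num)]
  have h1 : x >>> (m + 3) = (x >>> m) / 8 := by
    rw [Int.shiftRight_eq_div_pow, Int.shiftRight_eq_div_pow]
    push_cast
    rw [pow_add, ← Int.ediv_ediv_of_nonneg (by positivity : (0:Int) ≤ 2 ^ m)]
    norm_num
  rw [h1]
  omega

-- A's accumulator loop from level a equals appending the closed-form per-level blocks
lemma loop_eq (begin end_ n_levels min_shift : Int) :
    ∀ (m : Nat) (a : Int), 0 ≤ a → ∀ (acc : List Int),
      ((PySem.List.pyRange a (a + m) 1).foldl (rtbStepA begin end_)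
        (((8 : Int) ^ a.toNat - 1) / 7, min_shift + 3 * n_levels - 3 * a, acc)).2.2
      = acc ++ (PySem.List.pyRange a (a + m) 1).flatMap (rtbLevel begin end_ n_levels min_shift) := by
  intro m
  induction m with
  | zero =>
    intro a _ acc
    rw [PySem.List.pyRange_one_eq_nil (by omega)]
    simp
  | succ m ih =>
    intro a ha acc
    rw [PySem.List.pyRange_one_cons (by omega)]
    simp only [List.foldl_cons, List.flatMap_cons]
    have hstep : rtbStepA begin end_
        (((8 : Int) ^ a.toNat - 1) / 7, min_shift + 3 * n_levels - 3 * a, acc) a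
        = (((8 : Int) ^ (a + 1).toNat - 1) / 7, min_shift + 3 * n_levels - 3 * (a + 1),
            acc ++ rtbLevel begin end_ n_levels min_shift a) := by
      have h1 : (a + 1).toNat = a.toNat + 1 := by omega
      simp only [rtbStepA, rtbLevel, Int.shiftLeft_eq, h1, t_closed_succ]
      have h3' : (a * 2 ^ 1 + a).toNat = 3 * a.toNat := by omega
      have hp : (1 : Int) * 2 ^ (3 * a.toNat) = 8 ^ a.toNat := by rw [pow_mul]; norm_num
      have hs : min_shift + 3 * n_levels - 3 * a = min_shift + 3 * (n_levels - a) := by ring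
      rw [h3', hp, hs]
      have hs3 : min_shift + 3 * (n_levels - a) - 3 = min_shift + 3 * n_levels - 3 * (a + 1) := by
        ring
      rw [hs3]
    rw [hstep]
    have := ih (a + 1) (by omega) (acc ++ rtbLevel begin end_ n_levels min_shift a)
    have hr : a + 1 + (m : Int) = a + (m + 1 : Nat) := by push_cast; ring
    rw [hr] at this
    rw [this, List.append_assoc]

-- B's tree descent from level a equals the same closed-form per-level blocks
lemma walk_eq (begin end_ n_levels min_shift : Int) (hms : 0 ≤ min_shift) :
    ∀ (fuel : Nat) (a : Int), 0 ≤ a → a + fuel = n_levels →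
      rtbWalk begin end_ fuel (min_shift + 3 * (n_levels - a))
        ((((8 : Int) ^ a.toNat - 1) / 7) + (begin >>> (min_shift + 3 * (n_levels - a)).toNat))
        ((((8 : Int) ^ a.toNat - 1) / 7) + (end_ >>> (min_shift + 3 * (n_levels - a)).toNat))
      = (PySem.List.pyRange a (n_levels + 1) 1).flatMap (rtbLevel begin end_ n_levels min_shift) := by
  intro fuel
  induction fuel with
  | zero =>
    intro a ha hend
    have hae : a = n_levels := by omega
    subst hae
    rw [rtbWalk,
        show PySem.List.pyRange a (a + 1) 1 = [a] from
          PySem.List.pyRange_one_singleton a]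
    simp [rtbLevel]
  | succ f ih =>
    intro a ha hend
    rw [rtbWalk]
    have hs' : min_shift + 3 * (n_levels - a) - 3 = min_shift + 3 * (n_levels - (a + 1)) := by ring
    have htn : (min_shift + 3 * (n_levels - a)).toNat
        = (min_shift + 3 * (n_levels - (a + 1))).toNat + 3 := by omega
    have h1 : (a + 1).toNat = a.toNat + 1 := by omega
    have hlo : 8 * ((((8 : Int) ^ a.toNat - 1) / 7)
          + (begin >>> (min_shift + 3 * (n_levels - a)).toNat)) + 1
          + PySem.Int.mod (begin >>> (min_shift + 3 * (n_levels - (a + 1))).toNat) 8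
        = (((8 : Int) ^ (a + 1).toNat - 1) / 7)
          + (begin >>> (min_shift + 3 * (n_levels - (a + 1))).toNat) := by
      have ht := t_child a.toNat
      have hsp := shift_split begin ((min_shift + 3 * (n_levels - (a + 1))).toNat)
      rw [htn, h1]
      omega
    have hhi : 8 * ((((8 : Int) ^ a.toNat - 1) / 7)
          + (end_ >>> (min_shift + 3 * (n_levels - a)).toNat)) + 1
          + PySem.Int.mod (end_ >>> (min_shift + 3 * (n_levels - (a + 1))).toNat) 8
        = (((8 : Int) ^ (a + 1).toNat - 1) / 7)
          + (end_ >>> (min_shift + 3 * (n_levels - (a + 1))).toNat) := by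
      have ht := t_child a.toNat
      have hsp := shift_split end_ ((min_shift + 3 * (n_levels - (a + 1))).toNat)
      rw [htn, h1]
      omega
    rw [hs', hlo, hhi, ih (a + 1) (by omega) (by omega),
        show PySem.List.pyRange a (n_levels + 1) 1
            = a :: PySem.List.pyRange (a + 1) (n_levels + 1) 1 from
          PySem.List.pyRange_one_cons (by omega),
        List.flatMap_cons]
    simp [rtbLevel]

-- ===== VERDICT (by name: the statement is the Claim_ definition above) =====
theorem region_to_bins_spec : Claim_equal_region_to_bins := by
  intro begin end_ n_levels min_shift _ hpre
  unfold Spec_region_to_bins region_to_bins region_to_bins_alt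
  by_cases h : 0 ≤ n_levels
  · have hms : 0 ≤ min_shift := by
      rcases hpre with h' | h'
      · omega
      · exact h'
    rw [if_pos h]
    have hfoldA := loop_eq begin end_ n_levels min_shift (n_levels + 1).toNat 0 le_rfl []
    have hb : (0 : Int) + ((n_levels + 1).toNat : Int) = n_levels + 1 := by omega
    rw [hb] at hfoldA
    have hinit : (((8 : Int) ^ (0 : Int).toNat - 1) / 7,
        min_shift + 3 * n_levels - 3 * 0, ([] : List Int))
        = ((0 : Int), min_shift + (n_levels <<< (1 : Nat)) + n_levels, ([] : List Int)) := by
      simp [Int.shiftLeft_eq]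
      ring
    rw [hinit] at hfoldA
    rw [hfoldA]
    have hwalk := walk_eq begin end_ n_levels min_shift hms n_levels.toNat 0 le_rfl (by omega)
    have h0 : ((8 : Int) ^ (0 : Int).toNat - 1) / 7 = 0 := by norm_num
    rw [h0] at hwalk
    simp only [sub_zero, zero_add] at hwalk
    simpa using hwalk.symm
  · rw [if_neg h, PySem.List.pyRange_one_eq_nil (by omega)]
    simp
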